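-- pv_equiv track=rewrite | github.com/Tharuntharun/DocumentDB | log_parser_and_plotter/log_parser_and_plotter.py | adjust_cumulative_seconds
-- ===== SOURCE A (Python) =====
-- def adjust_cumulative_seconds(runs):
--     adjusted_entries = []
--     cumulative_offset = 0
--
--     for run_index, run in enumerate(runs, start=1):
--         for entry in run:
--             adjusted_entry = entry.copy()
--             adjusted_entry['run'] = run_index
--             adjusted_entry['cumulative_second'] = entry['second'] + cumulative_offset
--             adjusted_entries.append(adjusted_entry)
--         if run:
--             max_second = max(entry['second'] for entry in run)
--             cumulative_offset += max_second + 1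
--
--     return adjusted_entries
-- ===== SOURCE B (Python) =====
-- def adjust_cumulative_seconds(runs):
--     # Pass 1: prefix-offset table; offsets[i] = cumulative offset before run i.
--     offsets = []
--     total = 0
--     for run in runs:
--         offsets.append(total)
--         total += (max(e['second'] for e in run) + 1) if run else 0
--     # Pass 2: build the adjusted entries from runs paired with their offsets.
--     return [{**e, 'run': i, 'cumulative_second': e['second'] + off}
--             for i, (run, off) in enumerate(zip(runs, offsets), 1)
--             for e in run]
-- ===== Notes on version B (the rewrite author's own statement) =====
-- stated objective: alternative
-- what changed: B separates the work into a first pass that builds a prefix-offset table for all runs and a second flattening pass over runs zipped with their offsets, instead of A's single interleaved loop that mutates a running offset while appending entries.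
import Mathlib
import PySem

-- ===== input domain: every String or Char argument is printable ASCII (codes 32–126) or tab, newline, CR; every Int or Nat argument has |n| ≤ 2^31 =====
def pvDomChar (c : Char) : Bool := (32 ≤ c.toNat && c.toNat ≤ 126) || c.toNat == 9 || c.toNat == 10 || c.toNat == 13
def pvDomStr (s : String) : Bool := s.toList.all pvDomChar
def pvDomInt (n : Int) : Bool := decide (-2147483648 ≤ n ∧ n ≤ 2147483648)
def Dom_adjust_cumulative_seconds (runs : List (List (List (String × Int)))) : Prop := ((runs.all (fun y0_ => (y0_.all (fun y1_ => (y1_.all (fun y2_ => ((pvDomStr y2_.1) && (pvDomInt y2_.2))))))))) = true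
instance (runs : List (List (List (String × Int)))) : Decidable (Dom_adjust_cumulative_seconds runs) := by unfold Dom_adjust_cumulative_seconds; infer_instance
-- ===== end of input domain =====

-- B re-implements A as two separate passes (a prefix-offset table, then a flattening pass); same cost, proved equal on entries that have a 'second' key.

-- shared helpers (both Pythons compute these same subexpressions)
-- entry['second'] (total form; Pre_ guarantees the key is present)
def pvSec (e : List (String × Int)) : Int := (PySem.Dict.mk e).getD "second" 0
-- entry.copy() with 'run' and 'cumulative_second' set (Python dict overwrite-in-place/append semantics)
def pvAdj (e : List (String × Int)) (idx off : Int) : List (String × Int) :=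
  ((((PySem.Dict.mk e).insert "run" idx).insert "cumulative_second" (pvSec e + off)).items)
-- the offset increment contributed by one run: max second + 1, or 0 for an empty run
def pvInc (run : List (List (String × Int))) : Int :=
  if run = [] then 0
  else match PySem.List.max? (run.map pvSec) (fun x => x) with
       | some m => m + 1
       | none => 0

-- ===== PORT A =====
def adjust_cumulative_seconds (runs : List (List (List (String × Int)))) : List (List (String × Int)) :=
  ((PySem.List.enumerate runs 1).foldl
    (fun (st : List (List (String × Int)) × Int) p =>
      (p.2.foldl (fun a e => a ++ [pvAdj e p.1 st.2]) st.1, st.2 + pvInc p.2))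
    ([], 0)).1

-- ===== PORT B =====
def adjust_cumulative_seconds_alt (runs : List (List (List (String × Int)))) : List (List (String × Int)) :=
  let offsets := (runs.foldl (fun (st : List Int × Int) run => (st.1 ++ [st.2], st.2 + pvInc run)) ([], 0)).1
  (PySem.List.enumerate (runs.zip offsets) 1).flatMap
    (fun p => p.2.1.map (fun e => pvAdj e p.1 p.2.2))

-- ===== PRECONDITION & SPEC =====
-- Pre_ excludes exactly the inputs on which A raises KeyError: an entry without a 'second' key.
def Pre_adjust_cumulative_seconds (runs : List (List (List (String × Int)))) : Prop :=
  (runs.all (fun run => run.all (fun e => (PySem.Dict.mk e).contains "second"))) = true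
instance (runs : List (List (List (String × Int)))) : Decidable (Pre_adjust_cumulative_seconds runs) := by unfold Pre_adjust_cumulative_seconds; infer_instance
def pvWitness_adjust_cumulative_seconds : (List (List (List (String × Int)))) :=
  [[[("second", 3), ("x", 7)], [("second", 5)]], [], [[("second", 0)]]]
def Spec_adjust_cumulative_seconds (runs : List (List (List (String × Int)))) (out : List (List (String × Int))) : Prop := out = adjust_cumulative_seconds_alt runs
instance (runs : List (List (List (String × Int)))) (out : List (List (String × Int))) : Decidable (Spec_adjust_cumulative_seconds runs out) := by unfold Spec_adjust_cumulative_seconds; infer_instance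

-- ===== CLAIM (what is proved, stated in full; the proofs are below) =====
def Claim_equal_adjust_cumulative_seconds : Prop := ∀ (runs : List (List (List (String × Int)))), Dom_adjust_cumulative_seconds runs → Pre_adjust_cumulative_seconds runs → Spec_adjust_cumulative_seconds runs (adjust_cumulative_seconds runs)

-- ===== LEMMAS AND PROOFS =====

-- the offset table B's first pass produces, as a structural recursion
def pvOffs (off : Int) : List (List (List (String × Int))) → List Int
  | [] => []
  | r :: rs => off :: pvOffs (off + pvInc r) rs

theorem pvOffs_foldl (rs : List (List (List (String × Int)))) :
    ∀ (acc : List Int) (off : Int),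
      (rs.foldl (fun (st : List Int × Int) run => (st.1 ++ [st.2], st.2 + pvInc run)) (acc, off)).1
        = acc ++ pvOffs off rs := by
  induction rs with
  | nil => intro acc off; simp [pvOffs]
  | cons r rs ih => intro acc off; simp [List.foldl, pvOffs, ih]

theorem pv_main (rs : List (List (List (String × Int)))) :
    ∀ (acc : List (List (String × Int))) (idx off : Int),
      ((PySem.List.enumerate rs idx).foldl
        (fun (st : List (List (String × Int)) × Int) p =>
          (p.2.foldl (fun a e => a ++ [pvAdj e p.1 st.2]) st.1, st.2 + pvInc p.2))
        (acc, off)).1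
      = acc ++ (PySem.List.enumerate (rs.zip (pvOffs off rs)) idx).flatMap
          (fun p => p.2.1.map (fun e => pvAdj e p.1 p.2.2)) := by
  induction rs with
  | nil => intro acc idx off; simp [pvOffs]
  | cons r rs ih =>
    intro acc idx off
    rw [pvOffs, List.zip_cons_cons, PySem.List.enumerate_cons, PySem.List.enumerate_cons]
    simp only [List.foldl_cons, List.flatMap_cons]
    rw [ih]
    simp [List.append_assoc]
    induction r with
    | nil => simp
    | cons x xs ihr => simp [ihr]

theorem adjust_eq (runs : List (List (List (String × Int)))) :
    adjust_cumulative_seconds runs = adjust_cumulative_seconds_alt runs := by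
  unfold adjust_cumulative_seconds adjust_cumulative_seconds_alt
  rw [pv_main, pvOffs_foldl]
  simp

-- ===== VERDICT (by name: the statement is the Claim_ definition above) =====
theorem adjust_cumulative_seconds_spec : Claim_equal_adjust_cumulative_seconds := by
  intro runs _ _
  unfold Spec_adjust_cumulative_seconds
  exact adjust_eq runs
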